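-- pv_equiv track=rewrite | github.com/arielbrno-max/TT | main.py | avaliar_mesa
-- ===== SOURCE A (Python) =====
-- ORDEM = {
--     "4": 1, "5": 2, "6": 3, "7": 4,
--     "Q": 5, "J": 6, "K": 7, "A": 8,
--     "2": 9, "3": 10
-- }
--
-- def forca_carta(carta, manilha):
--     if carta == manilha:
--         return 100
--     return ORDEM.get(carta, 0)
--
-- def avaliar_mesa(cartas_jogadas, manilha):
--     if not cartas_jogadas:
--         return "FRACA"
--     max_forca = max(forca_carta(c, manilha) for c in cartas_jogadas)
--     if max_forca >= 100:
--         return "FORTE"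
--     elif max_forca >= 7:
--         return "MEDIA"
--     else:
--         return "FRACA"
-- ===== SOURCE B (Python) =====
-- HIGH = {"K", "A", "2", "3"}  # exactly the ranks with ORDEM value >= 7
--
-- def avaliar_mesa(cartas_jogadas, manilha):
--     if not cartas_jogadas:
--         return "FRACA"
--     if manilha in cartas_jogadas:
--         return "FORTE"
--     if any(c in HIGH for c in cartas_jogadas):
--         return "MEDIA"
--     return "FRACA"
-- ===== Notes on version B (the rewrite author's own statement) =====
-- stated objective: simpler
-- what changed: Replaces the numeric max-force accumulation over ORDEM with direct membership tests: FORTE iff the manilha was played, MEDIA iff any played card is in {K,A,2,3} (the ranks with ORDEM value >= 7), else FRACA.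
import Mathlib
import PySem

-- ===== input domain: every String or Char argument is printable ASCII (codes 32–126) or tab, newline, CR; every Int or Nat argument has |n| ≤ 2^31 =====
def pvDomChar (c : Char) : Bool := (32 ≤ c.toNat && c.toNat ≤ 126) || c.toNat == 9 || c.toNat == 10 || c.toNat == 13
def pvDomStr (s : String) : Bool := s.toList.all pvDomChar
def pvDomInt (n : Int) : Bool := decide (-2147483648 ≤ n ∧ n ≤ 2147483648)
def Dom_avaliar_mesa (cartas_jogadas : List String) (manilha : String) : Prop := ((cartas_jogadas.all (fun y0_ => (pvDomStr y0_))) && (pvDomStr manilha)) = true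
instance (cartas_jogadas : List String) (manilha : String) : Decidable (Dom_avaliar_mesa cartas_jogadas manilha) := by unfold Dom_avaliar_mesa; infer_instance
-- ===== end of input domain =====

-- B replaces A's numeric max-force accumulation by direct membership tests (objective: simpler).

-- ===== PORT A =====
def ORDEM : PySem.Dict String Int :=
  PySem.Dict.ofList [("4", 1), ("5", 2), ("6", 3), ("7", 4),
                     ("Q", 5), ("J", 6), ("K", 7), ("A", 8),
                     ("2", 9), ("3", 10)]

def forca_carta (carta : String) (manilha : String) : Int :=
  if carta == manilha then 100 else ORDEM.getD carta 0

def avaliar_mesa (cartas_jogadas : List String) (manilha : String) : String :=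
  match cartas_jogadas with
  | [] => "FRACA"
  | c :: rest =>
    -- max over the nonempty generator: seed with the first card, fold max over the rest
    let max_forca := rest.foldl (fun acc x => max acc (forca_carta x manilha)) (forca_carta c manilha)
    if max_forca ≥ 100 then "FORTE"
    else if max_forca ≥ 7 then "MEDIA"
    else "FRACA"

-- ===== PORT B =====
def HIGH : PySem.Set String := PySem.Set.ofList ["K", "A", "2", "3"]

def avaliar_mesa_alt (cartas_jogadas : List String) (manilha : String) : String :=
  if cartas_jogadas.isEmpty then "FRACA"
  else if cartas_jogadas.contains manilha then "FORTE"
  else if cartas_jogadas.any (fun c => HIGH.contains c) then "MEDIA"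
  else "FRACA"

-- ===== PRECONDITION & SPEC =====
def Spec_avaliar_mesa (cartas_jogadas : List String) (manilha : String) (out : String) : Prop := out = avaliar_mesa_alt cartas_jogadas manilha
instance (cartas_jogadas : List String) (manilha : String) (out : String) : Decidable (Spec_avaliar_mesa cartas_jogadas manilha out) := by unfold Spec_avaliar_mesa; infer_instance

-- ===== CLAIM (what is proved, stated in full; the proofs are below) =====
def Claim_equal_avaliar_mesa : Prop := ∀ (cartas_jogadas : List String) (manilha : String), Dom_avaliar_mesa cartas_jogadas manilha → Spec_avaliar_mesa cartas_jogadas manilha (avaliar_mesa cartas_jogadas manilha)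

-- ===== LEMMAS AND PROOFS =====

theorem foldl_max_ge {f : String → Int} (t : Int) :
    ∀ (l : List String) (init : Int),
      (t ≤ l.foldl (fun acc x => max acc (f x)) init) ↔ (t ≤ init ∨ ∃ x ∈ l, t ≤ f x) := by
  intro l
  induction l with
  | nil => intro init; simp
  | cons y ys ih =>
    intro init
    simp only [List.foldl_cons, ih, le_max_iff, List.mem_cons]
    constructor
    · rintro ((h | h) | ⟨x, hx, hfx⟩)
      · exact Or.inl h
      · exact Or.inr ⟨y, Or.inl rfl, h⟩
      · exact Or.inr ⟨x, Or.inr hx, hfx⟩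
    · rintro (h | ⟨x, (rfl | hx), hfx⟩)
      · exact Or.inl (Or.inl h)
      · exact Or.inl (Or.inr hfx)
      · exact Or.inr ⟨x, hx, hfx⟩

theorem ordem_mk : ORDEM = PySem.Dict.mk [("4", 1), ("5", 2), ("6", 3), ("7", 4),
    ("Q", 5), ("J", 6), ("K", 7), ("A", 8), ("2", 9), ("3", 10)] := by decide

theorem ordem_le_ten (carta : String) : ORDEM.getD carta 0 ≤ 10 := by
  rw [ordem_mk]
  simp only [PySem.Dict.getD, PySem.Dict.get?_mk_cons]
  split_ifs <;> simp [PySem.Dict.get?]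

theorem forca_ge_100 (carta manilha : String) :
    (100 : Int) ≤ forca_carta carta manilha ↔ carta = manilha := by
  unfold forca_carta
  split_ifs with h
  · simpa using h
  · have := ordem_le_ten carta
    constructor
    · intro h100; omega
    · intro he; exact absurd he (by simpa using h)

theorem ordem_ge_seven (carta : String) :
    (7 : Int) ≤ ORDEM.getD carta 0 ↔ carta ∈ ["K", "A", "2", "3"] := by
  rw [ordem_mk]
  simp only [PySem.Dict.getD, PySem.Dict.get?_mk_cons]
  split_ifs with h1 h2 h3 h4 h5 h6 h7 h8 h9 h10 <;>
    simp_all [PySem.Dict.get?, List.mem_cons]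
  all_goals refine ⟨fun h => ?_, fun h => ?_, fun h => ?_, fun h => ?_⟩ <;> simp_all

theorem forca_ge_7 (carta manilha : String) :
    (7 : Int) ≤ forca_carta carta manilha ↔ carta = manilha ∨ carta ∈ ["K", "A", "2", "3"] := by
  unfold forca_carta
  split_ifs with h
  · simp at h; simp [h]
  · rw [ordem_ge_seven]
    simp at h
    tauto

theorem high_contains (c : String) : HIGH.contains c = true ↔ c ∈ ["K", "A", "2", "3"] := by
  simp [HIGH]

-- ===== VERDICT (by name: the statement is the Claim_ definition above) =====
theorem avaliar_mesa_spec : Claim_equal_avaliar_mesa := by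
  intro cartas manilha _
  unfold Spec_avaliar_mesa avaliar_mesa avaliar_mesa_alt
  match cartas with
  | [] => simp
  | c :: rest =>
    simp only [List.isEmpty_cons, Bool.false_eq_true, if_false]
    have hmax100 := (foldl_max_ge (f := fun x => forca_carta x manilha) 100 rest (forca_carta c manilha))
    have hmax7 := (foldl_max_ge (f := fun x => forca_carta x manilha) 7 rest (forca_carta c manilha))
    by_cases hF : (100 : Int) ≤ rest.foldl (fun acc x => max acc (forca_carta x manilha)) (forca_carta c manilha)
    · -- FORTE: the manilha was played
      have hmem : manilha ∈ c :: rest := by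
        rcases hmax100.mp hF with h | ⟨x, hx, hfx⟩
        · exact (forca_ge_100 c manilha).mp h ▸ List.mem_cons_self
        · exact List.mem_cons_of_mem _ ((forca_ge_100 x manilha).mp hfx ▸ hx)
      have hcont : (c :: rest).contains manilha = true := by
        exact List.contains_iff_mem.mpr hmem
      rw [if_pos hF, hcont, if_pos rfl]
    · have hnm : ¬ manilha ∈ c :: rest := by
        intro hm
        apply hF
        rcases List.mem_cons.mp hm with he | hm'
        · exact hmax100.mpr (Or.inl ((forca_ge_100 c manilha).mpr he.symm))
        · exact hmax100.mpr (Or.inr ⟨manilha, hm', (forca_ge_100 manilha manilha).mpr rfl⟩)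
      have hcont : (c :: rest).contains manilha = false := by
        simpa using hnm
      rw [if_neg hF, hcont]
      by_cases hM : (7 : Int) ≤ rest.foldl (fun acc x => max acc (forca_carta x manilha)) (forca_carta c manilha)
      · -- MEDIA: some played card is a high rank
        have hany : ((c :: rest).any (fun x => HIGH.contains x)) = true := by
          rcases hmax7.mp hM with h | ⟨x, hx, hfx⟩
          · rcases (forca_ge_7 c manilha).mp h with he | hc
            · exact absurd (he ▸ List.mem_cons_self) hnm
            · simp only [List.any_cons, Bool.or_eq_true]
              exact Or.inl ((high_contains c).mpr hc)
          · rcases (forca_ge_7 x manilha).mp hfx with he | hc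
            · exact absurd (he ▸ List.mem_cons_of_mem _ hx) hnm
            · simp only [List.any_eq_true]
              exact ⟨x, List.mem_cons_of_mem _ hx, (high_contains x).mpr hc⟩
        rw [if_pos hM, hany]
        simp
      · -- FRACA: no high card, no manilha
        have hany : ((c :: rest).any (fun x => HIGH.contains x)) = false := by
          rw [Bool.eq_false_iff]
          intro hany
          rcases List.any_eq_true.mp hany with ⟨x, hx, hhx⟩
          apply hM
          rcases List.mem_cons.mp hx with rfl | hx'
          · exact hmax7.mpr (Or.inl ((forca_ge_7 x manilha).mpr (Or.inr ((high_contains x).mp hhx))))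
          · exact hmax7.mpr (Or.inr ⟨x, hx', (forca_ge_7 x manilha).mpr (Or.inr ((high_contains x).mp hhx))⟩)
        rw [if_neg hM, hany]
        simp
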